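-- pv_equiv track=rewrite | github.com/LittleOne008/les-military-mrc-rank7 | preprocess/1.3.gen_ner_features.py | fetch_ner
-- ===== SOURCE A (Python) =====
-- def fetch_ner(text, entities):
--     # 处理 char 的 entity 边界
--     char_i = 0
--     entity_i = 0
--     char_entity = []
--     while char_i < len(text):
--         if entity_i == len(entities):
--             char_entity.append('')
--             char_i += 1
--             continue
--         if char_i < entities[entity_i][0]:  # 非实体词的 char
--             char_entity.append('')
--             char_i += 1
--         elif entities[entity_i][0] <= char_i < entities[entity_i][0] + len(entities[entity_i][3]):
--             char_entity.append(entities[entity_i][2])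
--             char_i += 1
--         else:
--             entity_i += 1
--
--     new_char_entity = []
--     for entity in char_entity:
--         if entity == 'time':
--             entity = 'T'
--         elif entity == 'location':
--             entity = 'L'
--         elif entity == 'org':
--             entity = 'O'
--         elif entity == 'job':
--             entity = 'J'
--         elif entity == 'person':
--             entity = 'P'
--         elif entity == 'company':
--             entity = 'C'
--         new_char_entity.append(entity)
--     return new_char_entity
-- ===== SOURCE B (Python) =====
-- def fetch_ner(text, entities):
--     # Per-entity arithmetic: compute gap/run block lengths with min/max and
--     # emit replicated blocks, instead of advancing character by character.
--     m = {'time': 'T', 'location': 'L', 'org': 'O', 'job': 'J',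
--          'person': 'P', 'company': 'C'}
--     n = len(text)
--     res = []
--     pos = 0
--     for start, _, label, estr in entities:
--         gap = max(0, min(n, start) - pos)
--         run = max(0, min(n, start + len(estr)) - (pos + gap))
--         res += [''] * gap + [m.get(label, label)] * run
--         pos += gap + run
--     res += [''] * (n - pos)
--     return res
-- ===== Notes on version B (the rewrite author's own statement) =====
-- stated objective: faster
-- what changed: B drops A's character-by-character merge (per-char while loop plus a second full label-remapping pass) for a single pass over the entities that computes each gap/run block length in O(1) min/max arithmetic and emits the blocks by list replication, with an inline dict for the label letters.
import Mathlib
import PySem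

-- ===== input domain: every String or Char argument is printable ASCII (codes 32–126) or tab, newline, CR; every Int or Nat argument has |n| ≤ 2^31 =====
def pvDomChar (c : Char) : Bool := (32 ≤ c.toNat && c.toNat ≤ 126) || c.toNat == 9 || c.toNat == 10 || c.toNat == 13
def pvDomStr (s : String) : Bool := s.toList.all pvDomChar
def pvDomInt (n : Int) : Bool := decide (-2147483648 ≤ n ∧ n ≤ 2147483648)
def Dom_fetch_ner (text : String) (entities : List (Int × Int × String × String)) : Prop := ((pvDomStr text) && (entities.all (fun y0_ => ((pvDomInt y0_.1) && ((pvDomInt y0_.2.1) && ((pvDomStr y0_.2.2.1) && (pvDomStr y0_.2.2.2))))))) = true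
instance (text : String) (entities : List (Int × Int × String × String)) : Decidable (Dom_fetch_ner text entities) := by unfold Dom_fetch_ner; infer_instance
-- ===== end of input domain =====

-- B replaces A's character-by-character scan (and second mapping pass) with one pass over the
-- entities computing each gap/run block length by min/max arithmetic and emitting replicated
-- blocks (objective: alternative decomposition).

-- ===== PORT A =====
-- A's while loop: advances char_i or entity_i; entities[entity_i]? = none mirrors
-- 'entity_i == len(entities)' (entity_i never exceeds the length along A's execution).
def fetchLoopA (n : Nat) (entities : List (Int × Int × String × String))
    (char_i entity_i : Nat) : List String :=
  if _h : char_i < n then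
    match he : entities[entity_i]? with
    | none => "" :: fetchLoopA n entities (char_i + 1) entity_i
    | some e =>
      if (char_i : Int) < e.1 then
        "" :: fetchLoopA n entities (char_i + 1) entity_i
      else if (char_i : Int) < e.1 + (e.2.2.2.toList.length : Int) then
        e.2.2.1 :: fetchLoopA n entities (char_i + 1) entity_i
      else
        fetchLoopA n entities char_i (entity_i + 1)
  else []
termination_by (n - char_i, entities.length - entity_i)
decreasing_by
  · apply Prod.Lex.left; omega
  · apply Prod.Lex.left; omega
  · apply Prod.Lex.left; omega
  · apply Prod.Lex.right' <;> (obtain ⟨hlt, -⟩ := List.getElem?_eq_some_iff.mp he; omega)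

-- A's second pass: the if/elif chain renaming the six labels
def mapLabelA (entity : String) : String :=
  if entity == "time" then "T"
  else if entity == "location" then "L"
  else if entity == "org" then "O"
  else if entity == "job" then "J"
  else if entity == "person" then "P"
  else if entity == "company" then "C"
  else entity

def fetch_ner (text : String) (entities : List (Int × Int × String × String)) : List String :=
  (fetchLoopA text.toList.length entities 0 0).map mapLabelA

-- ===== PORT B =====
-- Source B's dict m
def labelDictB : PySem.Dict String String :=
  PySem.Dict.ofList [("time", "T"), ("location", "L"), ("org", "O"),
                     ("job", "J"), ("person", "P"), ("company", "C")]

-- Source B's for-loop: per entity, gap/run block lengths by min/max arithmetic,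
-- ['']*gap + [tag]*run appended; final ['']*(n-pos) tail.
def fetchLoopB (n : Nat) (entities : List (Int × Int × String × String)) (pos : Int) :
    List String :=
  match entities with
  | [] => List.replicate ((n : Int) - pos).toNat ""
  | (start, _, label, estr) :: rest =>
    let gap := max 0 (min (n : Int) start - pos)
    let run := max 0 (min (n : Int) (start + (estr.toList.length : Int)) - (pos + gap))
    List.replicate gap.toNat "" ++
      List.replicate run.toNat (labelDictB.getD label label) ++
      fetchLoopB n rest (pos + gap + run)

def fetch_ner_alt (text : String) (entities : List (Int × Int × String × String)) : List String :=
  fetchLoopB text.toList.length entities 0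

-- ===== PRECONDITION & SPEC =====
def Spec_fetch_ner (text : String) (entities : List (Int × Int × String × String)) (out : List String) : Prop := out = fetch_ner_alt text entities
instance (text : String) (entities : List (Int × Int × String × String)) (out : List String) : Decidable (Spec_fetch_ner text entities out) := by unfold Spec_fetch_ner; infer_instance

-- ===== CLAIM (what is proved, stated in full; the proofs are below) =====
def Claim_equal_fetch_ner : Prop := ∀ (text : String) (entities : List (Int × Int × String × String)), Dom_fetch_ner text entities → Spec_fetch_ner text entities (fetch_ner text entities)

-- ===== LEMMAS AND PROOFS =====

lemma mapLabel_eq (lab : String) : labelDictB.getD lab lab = mapLabelA lab := by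
  have hd : labelDictB = PySem.Dict.mk [("time", "T"), ("location", "L"), ("org", "O"),
      ("job", "J"), ("person", "P"), ("company", "C")] := by decide
  rw [hd, PySem.Dict.getD_eq_get?_getD]
  simp only [PySem.Dict.get?_mk_cons, beq_iff_eq]
  unfold mapLabelA
  simp only [beq_iff_eq]
  split_ifs <;> subst_vars <;> simp_all [PySem.Dict.get?]

lemma mapLabelA_empty : mapLabelA "" = "" := by decide

lemma fetchLoopB_ge (n : Nat) (es : List (Int × Int × String × String)) : ∀ (pos : Int),
    (n : Int) ≤ pos → fetchLoopB n es pos = [] := by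
  induction es with
  | nil =>
    intro pos h
    simp only [fetchLoopB]
    rw [show ((n : Int) - pos).toNat = 0 from by omega]
    simp
  | cons e rest ih =>
    obtain ⟨s, b, lab, estr⟩ := e
    intro pos h
    simp only [fetchLoopB]
    have hg : max 0 (min (n : Int) s - pos) = 0 := by omega
    rw [hg]
    have hr : max 0 (min (n : Int) (s + (estr.toList.length : Int)) - (pos + 0)) = 0 := by omega
    rw [hr, ih (pos + 0 + 0) (by omega)]
    simp

-- one char consumed: the head entity covers or is ahead of pos, and pos is inside text
lemma fetchLoopB_step (n : Nat) (s b : Int) (lab estr : String)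
    (rest : List (Int × Int × String × String)) (pos : Int)
    (hn : pos < (n : Int)) (hend : pos < s + (estr.toList.length : Int)) :
    fetchLoopB n ((s, b, lab, estr) :: rest) pos =
      (if pos < s then "" else labelDictB.getD lab lab) ::
        fetchLoopB n ((s, b, lab, estr) :: rest) (pos + 1) := by
  have hlen : (0 : Int) ≤ (estr.toList.length : Int) := by positivity
  simp only [fetchLoopB]
  by_cases hps : pos < s
  · -- gap ≥ 1; the char emitted is ''
    have hgap : max 0 (min (n : Int) s - pos) = (min (n : Int) s - pos) := by omega
    have hgap' : max 0 (min (n : Int) s - (pos + 1)) = (min (n : Int) s - (pos + 1)) := by omega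
    rw [hgap, hgap']
    have e1 : (min (n : Int) s - pos).toNat = (min (n : Int) s - (pos + 1)).toNat + 1 := by omega
    rw [e1, List.replicate_succ, if_pos hps]
    have e2 : pos + (min (n : Int) s - pos) = (pos + 1) + (min (n : Int) s - (pos + 1)) := by ring
    rw [e2]
    simp
  · -- gap = 0 at both pos and pos+1; run ≥ 1
    have hgap : max 0 (min (n : Int) s - pos) = 0 := by omega
    have hgap' : max 0 (min (n : Int) s - (pos + 1)) = 0 := by omega
    rw [hgap, hgap', if_neg hps]
    have hrun : max 0 (min (n : Int) (s + (estr.toList.length : Int)) - (pos + 0)) =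
        min (n : Int) (s + (estr.toList.length : Int)) - pos := by omega
    have hrun' : max 0 (min (n : Int) (s + (estr.toList.length : Int)) - (pos + 1 + 0)) =
        min (n : Int) (s + (estr.toList.length : Int)) - (pos + 1) := by omega
    rw [hrun, hrun']
    have e1 : (min (n : Int) (s + (estr.toList.length : Int)) - pos).toNat =
        (min (n : Int) (s + (estr.toList.length : Int)) - (pos + 1)).toNat + 1 := by omega
    rw [e1, List.replicate_succ]
    have e2 : pos + 0 + (min (n : Int) (s + (estr.toList.length : Int)) - pos) =
        pos + 1 + 0 + (min (n : Int) (s + (estr.toList.length : Int)) - (pos + 1)) := by ring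
    rw [e2]
    simp

-- entity already behind pos: it contributes nothing
lemma fetchLoopB_skip (n : Nat) (s b : Int) (lab estr : String)
    (rest : List (Int × Int × String × String)) (pos : Int)
    (hend : s + (estr.toList.length : Int) ≤ pos) :
    fetchLoopB n ((s, b, lab, estr) :: rest) pos = fetchLoopB n rest pos := by
  have hlen : (0 : Int) ≤ (estr.toList.length : Int) := by positivity
  simp only [fetchLoopB]
  have hg : max 0 (min (n : Int) s - pos) = 0 := by omega
  rw [hg]
  have hr : max 0 (min (n : Int) (s + (estr.toList.length : Int)) - (pos + 0)) = 0 := by omega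
  rw [hr]
  simp

-- the key invariant: A's scan from (pos, i) equals B's run over the remaining entities from pos
lemma key_lemma (n : Nat) (entities : List (Int × Int × String × String)) :
    ∀ (k i pos : Nat), (n - pos) + (entities.length - i) ≤ k →
      (fetchLoopA n entities pos i).map mapLabelA = fetchLoopB n (entities.drop i) (pos : Int) := by
  intro k
  induction k with
  | zero =>
    intro i pos h
    have hpn : n ≤ pos := by omega
    rw [fetchLoopA, dif_neg (by omega)]
    rw [fetchLoopB_ge n _ (pos : Int) (by exact_mod_cast hpn)]
    simp
  | succ k ih =>
    intro i pos h
    by_cases hpn : pos < n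
    · rw [fetchLoopA, dif_pos hpn]
      split
      · -- entity_i has run off the list: only '' chars remain
        next he =>
        have hlen : entities.length ≤ i := by
          simpa using List.getElem?_eq_none_iff.mp he
        have hd : entities.drop i = [] := List.drop_eq_nil_of_le hlen
        simp only [List.map_cons, mapLabelA_empty]
        rw [ih i (pos + 1) (by omega), hd]
        simp only [fetchLoopB]
        rw [show ((n : Int) - (pos : Int)).toNat = ((n : Int) - ((pos : Nat) + 1 : Nat)).toNat + 1
          from by push_cast; omega, List.replicate_succ]
      · next e he =>
        obtain ⟨s, b, lab, estr⟩ := e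
        have hi : i < entities.length := (List.getElem?_eq_some_iff.mp he).1
        have hd : entities.drop i = (s, b, lab, estr) :: entities.drop (i + 1) :=
          List.drop_eq_getElem_cons hi ▸ by
            rw [(List.getElem?_eq_some_iff.mp he).2]
        by_cases h1 : (pos : Int) < s
        · rw [if_pos h1]
          simp only [List.map_cons, mapLabelA_empty]
          rw [ih i (pos + 1) (by omega), hd]
          rw [fetchLoopB_step n s b lab estr _ (pos : Int)
            (by exact_mod_cast hpn) (by
              have : (0 : Int) ≤ (estr.toList.length : Int) := by positivity
              omega), if_pos h1]
          push_cast
          rfl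
        · rw [if_neg h1]
          by_cases h2 : (pos : Int) < s + (estr.toList.length : Int)
          · rw [if_pos h2]
            simp only [List.map_cons]
            rw [ih i (pos + 1) (by omega), hd]
            rw [fetchLoopB_step n s b lab estr _ (pos : Int)
              (by exact_mod_cast hpn) h2, if_neg h1, mapLabel_eq]
            push_cast
            rfl
          · rw [if_neg h2]
            rw [ih (i + 1) pos (by omega), hd]
            rw [fetchLoopB_skip n s b lab estr _ (pos : Int) (by omega)]
    · rw [fetchLoopA, dif_neg hpn]
      rw [fetchLoopB_ge n _ (pos : Int) (by exact_mod_cast Nat.le_of_not_lt hpn)]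
      simp

-- ===== VERDICT (by name: the statement is the Claim_ definition above) =====
theorem fetch_ner_spec : Claim_equal_fetch_ner := by
  intro text entities _
  show fetch_ner text entities = fetch_ner_alt text entities
  unfold fetch_ner fetch_ner_alt
  rw [key_lemma text.toList.length entities ((text.toList.length - 0) + (entities.length - 0)) 0 0 (le_refl _)]
  simp
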